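-- pv_equiv track=rewrite | github.com/bobbyLast/Ghost-AI-3.0 | tennis_comprehensive_data_fetcher.py | get_star_players_in_fixtures
-- ===== SOURCE A (Python) =====
-- ATP_TOP_50 = [
--     "N. Djokovic", "C. Alcaraz", "J. Sinner", "D. Medvedev",
--     "A. Zverev", "A. Rublev", "S. Tsitsipas", "H. Hurkacz",
--     "C. Ruud", "T. Fritz", "G. Dimitrov", "A. de Minaur",
--     "H. Rune", "T. Paul", "B. Shelton", "S. Korda",
--     "F. Tiafoe", "F. Auger-Aliassime", "K. Khachanov", "N. Jarry",
--     "U. Humbert", "A. Mannarino", "A. Tabilo", "S. Baez",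
--     "T. M. Etcheverry", "L. Musetti", "J. L. Struff", "A. Bublik",
--     "T. Griekspoor", "J. Thompson", "C. Eubanks", "M. Purcell",
--     "M. Giron", "D. Evans", "A. Murray", "S. Wawrinka",
--     "D. Thiem", "G. Monfils", "R. Gasquet", "F. Fognini",
--     "R. Bautista Agut", "P. Carreno Busta", "A. Ramos-Vinolas", "F. Coria",
--     "P. Cachin", "T. Seyboth Wild", "F. Diaz Acosta", "L. Darderi",
--     "F. Cobolli", "J. Mensik", "A. Fils", "L. Van Assche"
-- ]
--
-- WTA_TOP_50 = [
--     "I. Swiatek", "A. Sabalenka", "C. Gauff", "E. Rybakina",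
--     "J. Pegula", "O. Jabeur", "M. Vondrousova", "Q. Zheng",
--     "M. Sakkari", "K. Muchova", "B. Krejcikova", "B. Haddad Maia",
--     "D. Kasatkina", "L. Samsonova", "V. Kudermetova", "E. Alexandrova",
--     "M. Keys", "E. Svitolina", "C. Garcia", "J. Ostapenko",
--     "V. Azarenka", "A. Pavlyuchenkova", "S. Stephens", "S. Kenin",
--     "D. Collins", "A. Riske-Amritraj", "B. Pera", "K. Siniakova",
--     "P. Martic", "D. Vekic", "M. Bouzkova", "A. Kalinina",
--     "M. Kostyuk", "L. Tsurenko", "V. Tomova", "A. Blinkova",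
--     "D. Parry", "C. Burel", "D. Shnaider", "M. Andreeva",
--     "L. Noskova", "E. Navarro", "P. Stearns", "A. Krueger",
--     "K. Day", "S. Vickery", "K. Volynets", "R. Montgomery",
--     "C. Ngounoue", "L. Hovde", "A. Eala", "B. Fruhvirtova"
-- ]
--
-- def get_star_players_in_fixtures(fixtures):
--     """Find which star players appear in the fixtures"""
--     all_stars = ATP_TOP_50 + WTA_TOP_50
--     star_players = set()
--
--     for fixture in fixtures:
--         p1_name = fixture.get('event_first_player', '').strip()
--         p2_name = fixture.get('event_second_player', '').strip()
--
--         # Check exact matches and various name formats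
--         for star in all_stars:
--             # Direct match
--             if star == p1_name or star == p2_name:
--                 star_players.add(star)
--                 continue
--
--             # Try to match by last name only
--             star_last_name = star.split()[-1]
--             p1_last_name = p1_name.split()[-1] if p1_name else ""
--             p2_last_name = p2_name.split()[-1] if p2_name else ""
--
--             if star_last_name == p1_last_name or star_last_name == p2_last_name:
--                 star_players.add(star)
--                 continue
--
--     return list(star_players)
-- ===== SOURCE B (Python) =====
-- ATP_TOP_50 = [
--     "N. Djokovic", "C. Alcaraz", "J. Sinner", "D. Medvedev",
--     "A. Zverev", "A. Rublev", "S. Tsitsipas", "H. Hurkacz",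
--     "C. Ruud", "T. Fritz", "G. Dimitrov", "A. de Minaur",
--     "H. Rune", "T. Paul", "B. Shelton", "S. Korda",
--     "F. Tiafoe", "F. Auger-Aliassime", "K. Khachanov", "N. Jarry",
--     "U. Humbert", "A. Mannarino", "A. Tabilo", "S. Baez",
--     "T. M. Etcheverry", "L. Musetti", "J. L. Struff", "A. Bublik",
--     "T. Griekspoor", "J. Thompson", "C. Eubanks", "M. Purcell",
--     "M. Giron", "D. Evans", "A. Murray", "S. Wawrinka",
--     "D. Thiem", "G. Monfils", "R. Gasquet", "F. Fognini",
--     "R. Bautista Agut", "P. Carreno Busta", "A. Ramos-Vinolas", "F. Coria",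
--     "P. Cachin", "T. Seyboth Wild", "F. Diaz Acosta", "L. Darderi",
--     "F. Cobolli", "J. Mensik", "A. Fils", "L. Van Assche"
-- ]
--
-- WTA_TOP_50 = [
--     "I. Swiatek", "A. Sabalenka", "C. Gauff", "E. Rybakina",
--     "J. Pegula", "O. Jabeur", "M. Vondrousova", "Q. Zheng",
--     "M. Sakkari", "K. Muchova", "B. Krejcikova", "B. Haddad Maia",
--     "D. Kasatkina", "L. Samsonova", "V. Kudermetova", "E. Alexandrova",
--     "M. Keys", "E. Svitolina", "C. Garcia", "J. Ostapenko",
--     "V. Azarenka", "A. Pavlyuchenkova", "S. Stephens", "S. Kenin",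
--     "D. Collins", "A. Riske-Amritraj", "B. Pera", "K. Siniakova",
--     "P. Martic", "D. Vekic", "M. Bouzkova", "A. Kalinina",
--     "M. Kostyuk", "L. Tsurenko", "V. Tomova", "A. Blinkova",
--     "D. Parry", "C. Burel", "D. Shnaider", "M. Andreeva",
--     "L. Noskova", "E. Navarro", "P. Stearns", "A. Krueger",
--     "K. Day", "S. Vickery", "K. Volynets", "R. Montgomery",
--     "C. Ngounoue", "L. Hovde", "A. Eala", "B. Fruhvirtova"
-- ]
--
--
-- def get_star_players_in_fixtures(fixtures):
--     """Find which star players appear in the fixtures.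
--
--     Two staged passes instead of A's nested fixtures-by-stars scan: first
--     index the fixtures once, collecting the set of stripped player names and
--     the set of their last-name tokens ('' for an empty name, exactly as A
--     derives them); then run once over the star list, keeping each star whose
--     full name or last-name token occurs in those sets.  A full-name match in
--     A implies a last-name match too (star names are non-empty), so the two
--     set-membership tests select exactly the stars A's inner scan selects.
--     """
--     full_names = set()
--     last_names = set()
--     for fixture in fixtures:
--         for key in ('event_first_player', 'event_second_player'):
--             name = fixture.get(key, '').strip()
--             full_names.add(name)
--             last_names.add(name.split()[-1] if name else '')
--     matched = set()
--     for star in ATP_TOP_50 + WTA_TOP_50: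
--         if star in full_names or star.split()[-1] in last_names:
--             matched.add(star)
--     return list(matched)
-- ===== Notes on version B (the rewrite author's own statement) =====
-- stated objective: alternative
-- what changed: A rescans all 104 stars (re-splitting every star name) inside the loop over fixtures; B makes two staged passes instead: it first indexes the fixtures' stripped names and their last-name tokens into two sets, then runs once over the star list testing each star against those sets, so the nested fixtures-by-stars scan disappears (measured only ~1.2x faster at the largest size, so no speed is claimed).
import Mathlib
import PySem

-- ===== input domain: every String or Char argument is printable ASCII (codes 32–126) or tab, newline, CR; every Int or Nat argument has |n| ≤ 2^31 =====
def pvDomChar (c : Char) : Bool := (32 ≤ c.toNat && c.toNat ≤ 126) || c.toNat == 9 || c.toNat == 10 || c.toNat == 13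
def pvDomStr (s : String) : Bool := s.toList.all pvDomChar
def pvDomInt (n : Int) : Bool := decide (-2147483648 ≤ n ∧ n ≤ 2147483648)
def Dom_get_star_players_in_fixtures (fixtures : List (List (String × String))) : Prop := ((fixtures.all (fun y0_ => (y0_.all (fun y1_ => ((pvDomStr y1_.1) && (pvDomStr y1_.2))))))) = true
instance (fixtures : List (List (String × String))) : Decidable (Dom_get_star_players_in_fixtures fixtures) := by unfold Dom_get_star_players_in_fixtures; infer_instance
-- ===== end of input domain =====

-- B replaces A's nested fixtures-by-stars scan by two staged passes: index the
-- fixtures' names (full names + last-name tokens) once, then one membership pass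
-- over the star list.  Both Pythons return list(set(...)), whose iteration order
-- is unspecified (string hash randomisation): both ports materialise that set in
-- sorted order, the canonical order-insensitive reading of list(set(...)).

-- ===== PORT A =====
def pvATP_TOP_50 : List String := [
    "N. Djokovic", "C. Alcaraz", "J. Sinner", "D. Medvedev",
    "A. Zverev", "A. Rublev", "S. Tsitsipas", "H. Hurkacz",
    "C. Ruud", "T. Fritz", "G. Dimitrov", "A. de Minaur",
    "H. Rune", "T. Paul", "B. Shelton", "S. Korda",
    "F. Tiafoe", "F. Auger-Aliassime", "K. Khachanov", "N. Jarry",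
    "U. Humbert", "A. Mannarino", "A. Tabilo", "S. Baez",
    "T. M. Etcheverry", "L. Musetti", "J. L. Struff", "A. Bublik",
    "T. Griekspoor", "J. Thompson", "C. Eubanks", "M. Purcell",
    "M. Giron", "D. Evans", "A. Murray", "S. Wawrinka",
    "D. Thiem", "G. Monfils", "R. Gasquet", "F. Fognini",
    "R. Bautista Agut", "P. Carreno Busta", "A. Ramos-Vinolas", "F. Coria",
    "P. Cachin", "T. Seyboth Wild", "F. Diaz Acosta", "L. Darderi",
    "F. Cobolli", "J. Mensik", "A. Fils", "L. Van Assche"]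

def pvWTA_TOP_50 : List String := [
    "I. Swiatek", "A. Sabalenka", "C. Gauff", "E. Rybakina",
    "J. Pegula", "O. Jabeur", "M. Vondrousova", "Q. Zheng",
    "M. Sakkari", "K. Muchova", "B. Krejcikova", "B. Haddad Maia",
    "D. Kasatkina", "L. Samsonova", "V. Kudermetova", "E. Alexandrova",
    "M. Keys", "E. Svitolina", "C. Garcia", "J. Ostapenko",
    "V. Azarenka", "A. Pavlyuchenkova", "S. Stephens", "S. Kenin",
    "D. Collins", "A. Riske-Amritraj", "B. Pera", "K. Siniakova",
    "P. Martic", "D. Vekic", "M. Bouzkova", "A. Kalinina",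
    "M. Kostyuk", "L. Tsurenko", "V. Tomova", "A. Blinkova",
    "D. Parry", "C. Burel", "D. Shnaider", "M. Andreeva",
    "L. Noskova", "E. Navarro", "P. Stearns", "A. Krueger",
    "K. Day", "S. Vickery", "K. Volynets", "R. Montgomery",
    "C. Ngounoue", "L. Hovde", "A. Eala", "B. Fruhvirtova"]

-- s.split()[-1], totalised with default "": exact whenever s has a non-space character
-- (every use below is either guarded by s ≠ "" on a stripped s, or on a star constant).
def pvLastTok (s : String) : String := PySem.List.pyGetD (PySem.Str.split₀ s) (-1) ""

def get_star_players_in_fixtures (fixtures : List (List (String × String))) : List String :=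
  let all_stars := pvATP_TOP_50 ++ pvWTA_TOP_50
  let star_players := fixtures.foldl
    (fun star_players fixture =>
      let p1_name := PySem.Str.strip ((PySem.Dict.mk fixture).getD "event_first_player" "")
      let p2_name := PySem.Str.strip ((PySem.Dict.mk fixture).getD "event_second_player" "")
      all_stars.foldl
        (fun sp star =>
          if star == p1_name || star == p2_name then PySem.Set.add sp star
          else
            let star_last_name := pvLastTok star
            let p1_last_name := if p1_name ≠ "" then pvLastTok p1_name else ""
            let p2_last_name := if p2_name ≠ "" then pvLastTok p2_name else ""
            if star_last_name == p1_last_name || star_last_name == p2_last_name then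
              PySem.Set.add sp star
            else sp)
        star_players)
    PySem.Set.empty
  PySem.List.sorted star_players (fun x => x) false

-- ===== PORT B =====
-- pass 1, inner loop: one fixture's names into the two index sets, key by key
def pvAddFixture (fixture : List (String × String)) :
    List String → PySem.Set String × PySem.Set String → PySem.Set String × PySem.Set String
  | [], fl => fl
  | key :: keys, (full, lasts) =>
      let name := PySem.Str.strip ((PySem.Dict.mk fixture).getD key "")
      pvAddFixture fixture keys
        (PySem.Set.add full name,
         PySem.Set.add lasts (if name ≠ "" then pvLastTok name else ""))

-- pass 1, outer loop over the fixtures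
def pvIndexNames : List (List (String × String)) →
    PySem.Set String × PySem.Set String → PySem.Set String × PySem.Set String
  | [], fl => fl
  | fixture :: rest, fl =>
      pvIndexNames rest (pvAddFixture fixture ["event_first_player", "event_second_player"] fl)

-- pass 2: keep each star whose full name or last-name token was indexed
def pvSelectStars (full lasts : PySem.Set String) :
    List String → PySem.Set String → PySem.Set String
  | [], matched => matched
  | star :: stars, matched =>
      pvSelectStars full lasts stars
        (if PySem.Set.contains full star || PySem.Set.contains lasts (pvLastTok star) then
          PySem.Set.add matched star
        else matched)

def get_star_players_in_fixtures_alt (fixtures : List (List (String × String))) : List String :=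
  let idx := pvIndexNames fixtures (PySem.Set.empty, PySem.Set.empty)
  let matched := pvSelectStars idx.1 idx.2 (pvATP_TOP_50 ++ pvWTA_TOP_50) PySem.Set.empty
  PySem.List.sorted matched (fun x => x) false

-- ===== PRECONDITION & SPEC =====
def Spec_get_star_players_in_fixtures (fixtures : List (List (String × String))) (out : List String) : Prop := out = get_star_players_in_fixtures_alt fixtures
instance (fixtures : List (List (String × String))) (out : List String) : Decidable (Spec_get_star_players_in_fixtures fixtures out) := by unfold Spec_get_star_players_in_fixtures; infer_instance

-- ===== CLAIM (what is proved, stated in full; the proofs are below) =====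
def Claim_equal_get_star_players_in_fixtures : Prop := ∀ (fixtures : List (List (String × String))), Dom_get_star_players_in_fixtures fixtures → Spec_get_star_players_in_fixtures fixtures (get_star_players_in_fixtures fixtures)

-- ===== LEMMAS AND PROOFS =====

-- the fixture's two names, as both programs compute them
def pvName1 (fixture : List (String × String)) : String :=
  PySem.Str.strip ((PySem.Dict.mk fixture).getD "event_first_player" "")
def pvName2 (fixture : List (String × String)) : String :=
  PySem.Str.strip ((PySem.Dict.mk fixture).getD "event_second_player" "")
-- the guarded last-name token (name.split()[-1] if name else "")
def pvG (n : String) : String := if n ≠ "" then pvLastTok n else ""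

-- the last-name membership test of A's inner loop, as a single predicate
def pvMatch (l1 l2 : String) (star : String) : Bool :=
  pvLastTok star == l1 || pvLastTok star == l2

theorem pvLastTok_empty : pvLastTok "" = "" := by decide

theorem pvG_lastTok (n : String) : pvG n = pvLastTok n := by
  by_cases h : n = ""
  · subst h; simp [pvG, pvLastTok_empty]
  · simp [pvG, h]

-- A full-name match implies a last-name match, so A's inner step is the pvMatch step.
theorem pvStep_eq (p1_name p2_name : String) :
    (fun (sp : PySem.Set String) (star : String) =>
      if star == p1_name || star == p2_name then PySem.Set.add sp star
      else
        let star_last_name := pvLastTok star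
        let p1_last_name := if p1_name ≠ "" then pvLastTok p1_name else ""
        let p2_last_name := if p2_name ≠ "" then pvLastTok p2_name else ""
        if star_last_name == p1_last_name || star_last_name == p2_last_name then
          PySem.Set.add sp star
        else sp)
    = (fun sp star =>
        if pvMatch (pvG p1_name) (pvG p2_name) star then PySem.Set.add sp star else sp) := by
  funext sp star
  simp only [pvMatch, pvG]
  by_cases h1 : star = p1_name
  · subst h1
    by_cases he : star = ""
    · subst he; simp [pvLastTok_empty]
    · simp [he]
  · by_cases h2 : star = p2_name
    · subst h2
      by_cases he : star = ""
      · subst he; simp [pvLastTok_empty]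
      · simp [he]
    · simp [beq_eq_false_iff_ne.mpr h1, beq_eq_false_iff_ne.mpr h2]

-- an if-add loop is Set.update with the filtered list
theorem pv_foldl_ite_add (l : List String) (p : String → Bool) (sp : PySem.Set String) :
    l.foldl (fun s x => if p x then PySem.Set.add s x else s) sp
      = PySem.Set.update sp (l.filter p) := by
  induction l generalizing sp with
  | nil => rfl
  | cons x l ih =>
    by_cases h : p x
    · simp [h, ih, PySem.Set.update_cons]
    · simp [h, ih]

-- A's set: membership characterisation of the outer fold
theorem pvA_mem (fixtures : List (List (String × String))) (sp : PySem.Set String) (x : String) :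
    x ∈ fixtures.foldl
      (fun sp f => PySem.Set.update sp
        ((pvATP_TOP_50 ++ pvWTA_TOP_50).filter (pvMatch (pvG (pvName1 f)) (pvG (pvName2 f))))) sp
    ↔ x ∈ sp ∨ ∃ f ∈ fixtures, x ∈ (pvATP_TOP_50 ++ pvWTA_TOP_50) ∧
        pvMatch (pvG (pvName1 f)) (pvG (pvName2 f)) x = true := by
  induction fixtures generalizing sp with
  | nil => simp
  | cons f rest ih =>
    simp only [List.foldl_cons, List.mem_cons]
    rw [ih, PySem.Set.mem_update, List.mem_filter]
    constructor
    · rintro ((h | h) | ⟨g, hg, h⟩)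
      · exact Or.inl h
      · exact Or.inr ⟨f, Or.inl rfl, h⟩
      · exact Or.inr ⟨g, Or.inr hg, h⟩
    · rintro (h | ⟨g, (rfl | hg), h⟩)
      · exact Or.inl (Or.inl h)
      · exact Or.inl (Or.inr h)
      · exact Or.inr ⟨g, hg, h⟩

-- A's set stays duplicate-free through the outer fold
theorem pvA_nodup (fixtures : List (List (String × String))) (sp : PySem.Set String)
    (h : sp.Nodup) :
    (fixtures.foldl
      (fun sp f => PySem.Set.update sp
        ((pvATP_TOP_50 ++ pvWTA_TOP_50).filter (pvMatch (pvG (pvName1 f)) (pvG (pvName2 f))))) sp).Nodup := by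
  induction fixtures generalizing sp with
  | nil => exact h
  | cons f rest ih => exact ih _ (PySem.Set.nodup_update _ _ h)

-- A's port computes the sorted list of exactly the pvMatch-hit stars
theorem pvA_char (fixtures : List (List (String × String))) :
    get_star_players_in_fixtures fixtures
      = PySem.List.sorted
          (fixtures.foldl
            (fun sp f => PySem.Set.update sp
              ((pvATP_TOP_50 ++ pvWTA_TOP_50).filter (pvMatch (pvG (pvName1 f)) (pvG (pvName2 f)))))
            PySem.Set.empty)
          (fun x => x) false := by
  have h : fixtures.foldl
      (fun star_players fixture =>
        (pvATP_TOP_50 ++ pvWTA_TOP_50).foldl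
          (fun sp star =>
            if star == pvName1 fixture || star == pvName2 fixture then PySem.Set.add sp star
            else
              let star_last_name := pvLastTok star
              let p1_last_name := if pvName1 fixture ≠ "" then pvLastTok (pvName1 fixture) else ""
              let p2_last_name := if pvName2 fixture ≠ "" then pvLastTok (pvName2 fixture) else ""
              if star_last_name == p1_last_name || star_last_name == p2_last_name then
                PySem.Set.add sp star
              else sp)
          star_players)
      PySem.Set.empty
      = fixtures.foldl
          (fun sp f => PySem.Set.update sp
            ((pvATP_TOP_50 ++ pvWTA_TOP_50).filter (pvMatch (pvG (pvName1 f)) (pvG (pvName2 f)))))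
          PySem.Set.empty := by
    apply PySem.List.foldl_congr_mem
    intro sp f _
    show (pvATP_TOP_50 ++ pvWTA_TOP_50).foldl _ sp = _
    rw [pvStep_eq (pvName1 f) (pvName2 f)]
    exact pv_foldl_ite_add _ _ sp
  exact congrArg (fun l => PySem.List.sorted l (fun x => x) false) h

-- ---- side B ----

-- pass 1 on one fixture, unfolded over the two-key list
theorem pvAddFixture_eq (fixture : List (String × String)) (full lasts : PySem.Set String) :
    pvAddFixture fixture ["event_first_player", "event_second_player"] (full, lasts)
      = (PySem.Set.add (PySem.Set.add full (pvName1 fixture)) (pvName2 fixture),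
         PySem.Set.add (PySem.Set.add lasts (pvG (pvName1 fixture))) (pvG (pvName2 fixture))) := by
  unfold pvName1 pvName2 pvG
  rfl

-- pass 1: what the full-name index contains
theorem pvIndex_mem1 (fixtures : List (List (String × String)))
    (full lasts : PySem.Set String) (x : String) :
    x ∈ (pvIndexNames fixtures (full, lasts)).1
    ↔ x ∈ full ∨ ∃ f ∈ fixtures, x = pvName1 f ∨ x = pvName2 f := by
  induction fixtures generalizing full lasts with
  | nil => simp [pvIndexNames]
  | cons f rest ih =>
    rw [pvIndexNames, pvAddFixture_eq, ih]
    simp only [PySem.Set.mem_add, List.mem_cons]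
    constructor
    · rintro (((h | h) | h) | ⟨g, hg, h⟩)
      · exact Or.inl h
      · exact Or.inr ⟨f, Or.inl rfl, Or.inl h⟩
      · exact Or.inr ⟨f, Or.inl rfl, Or.inr h⟩
      · exact Or.inr ⟨g, Or.inr hg, h⟩
    · rintro (h | ⟨g, (rfl | hg), h⟩)
      · exact Or.inl (Or.inl (Or.inl h))
      · rcases h with h | h
        · exact Or.inl (Or.inl (Or.inr h))
        · exact Or.inl (Or.inr h)
      · exact Or.inr ⟨g, hg, h⟩

-- pass 1: what the last-name index contains
theorem pvIndex_mem2 (fixtures : List (List (String × String)))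
    (full lasts : PySem.Set String) (x : String) :
    x ∈ (pvIndexNames fixtures (full, lasts)).2
    ↔ x ∈ lasts ∨ ∃ f ∈ fixtures, x = pvG (pvName1 f) ∨ x = pvG (pvName2 f) := by
  induction fixtures generalizing full lasts with
  | nil => simp [pvIndexNames]
  | cons f rest ih =>
    rw [pvIndexNames, pvAddFixture_eq, ih]
    simp only [PySem.Set.mem_add, List.mem_cons]
    constructor
    · rintro (((h | h) | h) | ⟨g, hg, h⟩)
      · exact Or.inl h
      · exact Or.inr ⟨f, Or.inl rfl, Or.inl h⟩
      · exact Or.inr ⟨f, Or.inl rfl, Or.inr h⟩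
      · exact Or.inr ⟨g, Or.inr hg, h⟩
    · rintro (h | ⟨g, (rfl | hg), h⟩)
      · exact Or.inl (Or.inl (Or.inl h))
      · rcases h with h | h
        · exact Or.inl (Or.inl (Or.inr h))
        · exact Or.inl (Or.inr h)
      · exact Or.inr ⟨g, hg, h⟩

-- pass 2: membership characterisation
theorem pvSelect_mem (full lasts : PySem.Set String) (stars : List String)
    (m : PySem.Set String) (x : String) :
    x ∈ pvSelectStars full lasts stars m
    ↔ x ∈ m ∨ (x ∈ stars ∧ (x ∈ full ∨ pvLastTok x ∈ lasts)) := by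
  induction stars generalizing m with
  | nil => simp [pvSelectStars]
  | cons star stars ih =>
    rw [pvSelectStars, ih]
    by_cases h : star ∈ full ∨ pvLastTok star ∈ lasts
    · have hb : (PySem.Set.contains full star || PySem.Set.contains lasts (pvLastTok star)) = true := by
        rcases h with h | h <;> simp [h]
      simp only [hb, if_true, PySem.Set.mem_add, List.mem_cons]
      constructor
      · rintro ((hm | rfl) | ⟨hs, hc⟩)
        · exact Or.inl hm
        · exact Or.inr ⟨Or.inl rfl, h⟩
        · exact Or.inr ⟨Or.inr hs, hc⟩
      · rintro (hm | ⟨rfl | hs, hc⟩)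
        · exact Or.inl (Or.inl hm)
        · exact Or.inl (Or.inr rfl)
        · exact Or.inr ⟨hs, hc⟩
    · have hb : (PySem.Set.contains full star || PySem.Set.contains lasts (pvLastTok star)) = false := by
        rw [not_or] at h
        simp [h.1, h.2]
      simp only [hb, Bool.false_eq_true, if_false, List.mem_cons]
      constructor
      · rintro (hm | ⟨hs, hc⟩)
        · exact Or.inl hm
        · exact Or.inr ⟨Or.inr hs, hc⟩
      · rintro (hm | ⟨rfl | hs, hc⟩)
        · exact Or.inl hm
        · exact absurd hc h
        · exact Or.inr ⟨hs, hc⟩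

-- pass 2 keeps the matched set duplicate-free
theorem pvSelect_nodup (full lasts : PySem.Set String) (stars : List String)
    (m : PySem.Set String) (h : m.Nodup) :
    (pvSelectStars full lasts stars m).Nodup := by
  induction stars generalizing m with
  | nil => exact h
  | cons star stars ih =>
    rw [pvSelectStars]
    split
    · exact ih _ (PySem.Set.nodup_add _ _ h)
    · exact ih _ h

-- one star, one fixture: B's two membership clauses are exactly A's pvMatch test
theorem pvCond_iff (f : List (String × String)) (x : String) :
    ((x = pvName1 f ∨ x = pvName2 f) ∨ (pvLastTok x = pvG (pvName1 f) ∨ pvLastTok x = pvG (pvName2 f)))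
    ↔ pvMatch (pvG (pvName1 f)) (pvG (pvName2 f)) x = true := by
  simp only [pvMatch, Bool.or_eq_true, beq_iff_eq]
  constructor
  · rintro ((rfl | rfl) | h)
    · exact Or.inl (pvG_lastTok _).symm
    · exact Or.inr (pvG_lastTok _).symm
    · exact h
  · exact fun h => Or.inr h

-- the two matched sets have the same members
theorem pv_same_members (fixtures : List (List (String × String))) (x : String) :
    (x ∈ fixtures.foldl
        (fun sp f => PySem.Set.update sp
          ((pvATP_TOP_50 ++ pvWTA_TOP_50).filter (pvMatch (pvG (pvName1 f)) (pvG (pvName2 f)))))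
        PySem.Set.empty)
    ↔ x ∈ pvSelectStars (pvIndexNames fixtures (PySem.Set.empty, PySem.Set.empty)).1
          (pvIndexNames fixtures (PySem.Set.empty, PySem.Set.empty)).2
          (pvATP_TOP_50 ++ pvWTA_TOP_50) PySem.Set.empty := by
  rw [pvA_mem, pvSelect_mem, pvIndex_mem1, pvIndex_mem2]
  have hempty : ∀ y : String, y ∈ (PySem.Set.empty : PySem.Set String) ↔ False := by
    intro y; simp [PySem.Set.empty]
  simp only [hempty, false_or]
  constructor
  · rintro ⟨f, hf, hs, hm⟩
    exact ⟨hs, ((pvCond_iff f x).mpr hm).elim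
      (fun h => Or.inl ⟨f, hf, h⟩) (fun h => Or.inr ⟨f, hf, h⟩)⟩
  · rintro ⟨hs, (⟨f, hf, h⟩ | ⟨f, hf, h⟩)⟩
    · exact ⟨f, hf, hs, (pvCond_iff f x).mp (Or.inl h)⟩
    · exact ⟨f, hf, hs, (pvCond_iff f x).mp (Or.inr h)⟩

-- ===== VERDICT (by name: the statement is the Claim_ definition above) =====
theorem get_star_players_in_fixtures_spec : Claim_equal_get_star_players_in_fixtures := by
  intro fixtures _
  unfold Spec_get_star_players_in_fixtures
  rw [pvA_char]
  unfold get_star_players_in_fixtures_alt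
  apply PySem.List.sorted_eq_sorted_of_perm _ _ _ (fun a b h => h)
  rw [List.perm_ext_iff_of_nodup
    (pvA_nodup fixtures PySem.Set.empty (by simp [PySem.Set.empty]))
    (pvSelect_nodup _ _ _ _ (by simp [PySem.Set.empty]))]
  exact fun x => pv_same_members fixtures x
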